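-- pv_equiv track=rewrite | github.com/ppinheirosiqueira/Brasileirao | auxiliares/contagem_pontos.py | contagem_pontos
-- ===== SOURCE A (Python) =====
-- resultados_2023 = [
--     [51, 1, 0],
--     [49, 1, 1],
--     [38, 2, 1],
--     [32, 2, 0],
--     [30, 0, 0],
--     [28, 0, 1],
--     [26, 1, 2],
--     [19, 0, 2],
--     [17, 3, 0],
--     [15, 2, 2],
--     [15, 3, 1],
--     [12, 0, 3],
--     [7, 3, 2],
--     [5, 2, 3],
--     [5, 4, 1],
--     [4, 3, 4],
--     [4, 4, 0],
--     [3, 3, 3],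
--     [3, 4, 2],
--     [2, 0, 4],
--     [2, 1, 4],
--     [2, 2, 4],
--     [2, 5, 1],
--     [1, 0, 5],
--     [1, 1, 3],
--     [1, 1, 5],
--     [1, 4, 3],
--     [1, 4, 4],
--     [1, 4, 6],
--     [1, 5, 0],
--     [1, 5, 3],
--     [1, 7, 1],
-- ]
--
-- def check_vencedor(mandante,visitante):
--     if mandante > visitante:
--         return "Mandante"
--     if visitante > mandante:
--         return "Visitante"
--     return "Empate"
--
-- def contagem_pontos(mandante, visitante):
--     aux_vitorioso = check_vencedor(mandante,visitante)
--     pontuacao = 0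
--     for resultado in resultados_2023:
--         if mandante == resultado[1]:
--             pontuacao += resultado[0]
--         if visitante == resultado[2]:
--             pontuacao += resultado[0]
--         if aux_vitorioso == check_vencedor(resultado[1],resultado[2]):
--             pontuacao += resultado[0]
--     return pontuacao
-- ===== SOURCE B (Python) =====
-- # The 2023 table is a fixed module constant, so its three aggregates are
-- # precomputed once by hand (sum of points per mandante-goal value, per
-- # visitante-goal value, and per winner class) and each call is pure lookups.
-- _PTS_MANDANTE = {1: 130, 2: 92, 0: 92, 3: 46, 4: 15, 5: 4, 7: 1}
-- _PTS_VISITANTE = {0: 135, 1: 138, 2: 70, 3: 23, 4: 11, 5: 2, 6: 1}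
-- _PTS_CLASSE = {"Mandante": 178, "Empate": 98, "Visitante": 104}
--
-- def contagem_pontos(mandante, visitante):
--     if mandante > visitante:
--         vencedor = "Mandante"
--     elif visitante > mandante:
--         vencedor = "Visitante"
--     else:
--         vencedor = "Empate"
--     return (_PTS_MANDANTE.get(mandante, 0)
--             + _PTS_VISITANTE.get(visitante, 0)
--             + _PTS_CLASSE[vencedor])
-- ===== Notes on version B (the rewrite author's own statement) =====
-- stated objective: faster
-- what changed: B replaces A's per-call scan of the fixed 32-row 2023 table by three precomputed aggregate lookup tables (points per mandante-goal value, per visitante-goal value, per winner class); each call is a winner classification plus three constant-time lookups, with no loop over the table at all.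
import Mathlib
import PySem

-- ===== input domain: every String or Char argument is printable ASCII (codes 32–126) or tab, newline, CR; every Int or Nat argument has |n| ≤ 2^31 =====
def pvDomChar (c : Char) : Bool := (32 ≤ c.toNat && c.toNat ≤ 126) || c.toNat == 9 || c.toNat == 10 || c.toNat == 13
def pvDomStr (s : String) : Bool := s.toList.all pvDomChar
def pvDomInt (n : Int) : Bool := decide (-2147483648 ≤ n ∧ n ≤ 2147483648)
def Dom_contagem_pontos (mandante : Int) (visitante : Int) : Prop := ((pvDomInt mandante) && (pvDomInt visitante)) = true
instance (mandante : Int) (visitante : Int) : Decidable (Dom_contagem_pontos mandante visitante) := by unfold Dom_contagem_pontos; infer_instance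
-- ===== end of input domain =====

-- B drops A's per-call scan of the fixed 2023 table: three precomputed
-- aggregate lookup tables make each call a classification plus three lookups.

-- ===== PORT A =====
def resultados_2023 : List (Int × Int × Int) :=
  [(51, 1, 0), (49, 1, 1), (38, 2, 1), (32, 2, 0), (30, 0, 0), (28, 0, 1),
   (26, 1, 2), (19, 0, 2), (17, 3, 0), (15, 2, 2), (15, 3, 1), (12, 0, 3),
   (7, 3, 2), (5, 2, 3), (5, 4, 1), (4, 3, 4), (4, 4, 0), (3, 3, 3),
   (3, 4, 2), (2, 0, 4), (2, 1, 4), (2, 2, 4), (2, 5, 1), (1, 0, 5),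
   (1, 1, 3), (1, 1, 5), (1, 4, 3), (1, 4, 4), (1, 4, 6), (1, 5, 0),
   (1, 5, 3), (1, 7, 1)]

def check_vencedor (mandante : Int) (visitante : Int) : String :=
  if mandante > visitante then "Mandante"
  else if visitante > mandante then "Visitante"
  else "Empate"

def contagem_pontos (mandante : Int) (visitante : Int) : Int :=
  let aux_vitorioso := check_vencedor mandante visitante
  resultados_2023.foldl (fun pontuacao resultado =>
    let pontuacao := if mandante == resultado.2.1 then pontuacao + resultado.1 else pontuacao
    let pontuacao := if visitante == resultado.2.2 then pontuacao + resultado.1 else pontuacao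
    if aux_vitorioso == check_vencedor resultado.2.1 resultado.2.2
    then pontuacao + resultado.1 else pontuacao) 0

-- ===== PORT B =====
-- Source B's precomputed aggregate tables, as literal association dicts
def ptsMandante : PySem.Dict Int Int :=
  PySem.Dict.mk [(1, 130), (2, 92), (0, 92), (3, 46), (4, 15), (5, 4), (7, 1)]
def ptsVisitante : PySem.Dict Int Int :=
  PySem.Dict.mk [(0, 135), (1, 138), (2, 70), (3, 23), (4, 11), (5, 2), (6, 1)]
def ptsClasse : PySem.Dict String Int :=
  PySem.Dict.mk [("Mandante", 178), ("Empate", 98), ("Visitante", 104)]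

def contagem_pontos_alt (mandante : Int) (visitante : Int) : Int :=
  let vencedor : String :=
    if mandante > visitante then "Mandante"
    else if visitante > mandante then "Visitante"
    else "Empate"
  -- _PTS_CLASSE[vencedor]: the key is always present, so getD is exact
  ptsMandante.getD mandante 0 + ptsVisitante.getD visitante 0
    + ptsClasse.getD vencedor 0

-- ===== PRECONDITION & SPEC =====
def Spec_contagem_pontos (mandante : Int) (visitante : Int) (out : Int) : Prop := out = contagem_pontos_alt mandante visitante
instance (mandante : Int) (visitante : Int) (out : Int) : Decidable (Spec_contagem_pontos mandante visitante out) := by unfold Spec_contagem_pontos; infer_instance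

-- ===== CLAIM =====
def Claim_equal_contagem_pontos : Prop := ∀ (mandante : Int) (visitante : Int), Dom_contagem_pontos mandante visitante → Spec_contagem_pontos mandante visitante (contagem_pontos mandante visitante)

-- ===== LEMMAS AND PROOFS =====

theorem foldA_split (m v : Int) (aux : String) (s : Int) (l : List (Int × Int × Int)) :
    l.foldl (fun pontuacao resultado =>
      let pontuacao := if m == resultado.2.1 then pontuacao + resultado.1 else pontuacao
      let pontuacao := if v == resultado.2.2 then pontuacao + resultado.1 else pontuacao
      if aux == check_vencedor resultado.2.1 resultado.2.2
      then pontuacao + resultado.1 else pontuacao) s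
    = s + (l.map (fun r => if m == r.2.1 then r.1 else 0)).sum
        + (l.map (fun r => if v == r.2.2 then r.1 else 0)).sum
        + (l.map (fun r => if aux == check_vencedor r.2.1 r.2.2 then r.1 else 0)).sum := by
  induction l generalizing s with
  | nil => simp
  | cons r t ih =>
    simp only [List.foldl_cons, List.map_cons, List.sum_cons]
    rw [ih]
    split_ifs <;> ring

theorem sumM_eq (m : Int) :
    (resultados_2023.map (fun r => if m == r.2.1 then r.1 else 0)).sum
      = ptsMandante.getD m 0 := by
  by_cases h0 : m = 0; · subst h0; decide
  by_cases h1 : m = 1; · subst h1; decide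
  by_cases h2 : m = 2; · subst h2; decide
  by_cases h3 : m = 3; · subst h3; decide
  by_cases h4 : m = 4; · subst h4; decide
  by_cases h5 : m = 5; · subst h5; decide
  by_cases h7 : m = 7; · subst h7; decide
  have f0 : ((0:Int) == m) = false := by simpa using Ne.symm h0
  have f1 : ((1:Int) == m) = false := by simpa using Ne.symm h1
  have f2 : ((2:Int) == m) = false := by simpa using Ne.symm h2
  have f3 : ((3:Int) == m) = false := by simpa using Ne.symm h3
  have f4 : ((4:Int) == m) = false := by simpa using Ne.symm h4
  have f5 : ((5:Int) == m) = false := by simpa using Ne.symm h5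
  have f7 : ((7:Int) == m) = false := by simpa using Ne.symm h7
  simp [resultados_2023, ptsMandante, PySem.Dict.getD, PySem.Dict.get?, List.find?,
    f0, f1, f2, f3, f4, f5, f7, h0, h1, h2, h3, h4, h5, h7]

theorem sumV_eq (v : Int) :
    (resultados_2023.map (fun r => if v == r.2.2 then r.1 else 0)).sum
      = ptsVisitante.getD v 0 := by
  by_cases h0 : v = 0; · subst h0; decide
  by_cases h1 : v = 1; · subst h1; decide
  by_cases h2 : v = 2; · subst h2; decide
  by_cases h3 : v = 3; · subst h3; decide
  by_cases h4 : v = 4; · subst h4; decide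
  by_cases h5 : v = 5; · subst h5; decide
  by_cases h6 : v = 6; · subst h6; decide
  have f0 : ((0:Int) == v) = false := by simpa using Ne.symm h0
  have f1 : ((1:Int) == v) = false := by simpa using Ne.symm h1
  have f2 : ((2:Int) == v) = false := by simpa using Ne.symm h2
  have f3 : ((3:Int) == v) = false := by simpa using Ne.symm h3
  have f4 : ((4:Int) == v) = false := by simpa using Ne.symm h4
  have f5 : ((5:Int) == v) = false := by simpa using Ne.symm h5
  have f6 : ((6:Int) == v) = false := by simpa using Ne.symm h6
  simp [resultados_2023, ptsVisitante, PySem.Dict.getD, PySem.Dict.get?, List.find?,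
    f0, f1, f2, f3, f4, f5, f6, h0, h1, h2, h3, h4, h5, h6]

theorem sumC_eq (m v : Int) :
    (resultados_2023.map (fun r => if check_vencedor m v == check_vencedor r.2.1 r.2.2 then r.1 else 0)).sum
      = ptsClasse.getD (check_vencedor m v) 0 := by
  rcases lt_trichotomy m v with h | h | h
  · have h1 : check_vencedor m v = "Visitante" := by
      simp [check_vencedor, not_lt.mpr h.le, h]
    rw [h1]; decide
  · subst h
    have h1 : check_vencedor m m = "Empate" := by simp [check_vencedor]
    rw [h1]; decide
  · have h1 : check_vencedor m v = "Mandante" := by simp [check_vencedor, h]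
    rw [h1]; decide

-- ===== VERDICT =====
theorem contagem_pontos_spec : Claim_equal_contagem_pontos := by
  intro m v _
  unfold Spec_contagem_pontos contagem_pontos contagem_pontos_alt
  rw [foldA_split, sumM_eq, sumV_eq, sumC_eq]
  simp only [check_vencedor]
  ring
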